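-- pv_equiv track=rewrite | github.com/lmmx/impscan | src/impscan/db/version_utils.py | strip_ver_alpha_chars
-- ===== SOURCE A (Python) =====
-- def strip_ver_alpha_chars(version_str: str) -> str:
--     REPLACING = False
--     new_str = ""
--     for char in version_str:
--         if char.isalpha():
--             if not REPLACING and new_str and new_str[-1] != ".":
--                 new_str += "."
--             REPLACING = True
--         elif REPLACING:
--             REPLACING = False
--             new_str += "0"
--             if char != ".":
--                 new_str += "."
--             new_str += char
--         else:
--             new_str += char
--     if new_str.endswith("."):
--         new_str += "0"
--     return new_str
-- ===== SOURCE B (Python) =====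
-- def strip_ver_alpha_chars(version_str: str) -> str:
--     # Run-based rewrite: each maximal alphabetic run becomes a single dotted zero,
--     # decided from its neighbouring characters in the original string.
--     s = version_str
--     n = len(s)
--     parts = []
--     i = 0
--     while i < n:
--         if s[i].isalpha():
--             j = i
--             while j < n and s[j].isalpha():
--                 j += 1
--             left = "." if i > 0 and s[i - 1] != "." else ""
--             digit = "0" if i > 0 or j < n else ""
--             right = "." if j < n and s[j] != "." else ""
--             parts.append(left + digit + right)
--             i = j
--         else:
--             parts.append(s[i])
--             i += 1
--     result = "".join(parts)
--     if result.endswith("."):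
--         result += "0"
--     return result
-- ===== Notes on version B (the rewrite author's own statement) =====
-- stated objective: alternative
-- what changed: Replaces A's character-by-character scan with a REPLACING flag and incremental edits to the output tail by a run-based rewrite: B skips each maximal alphabetic run in one inner scan and emits its dotted zero directly from the run's neighbouring characters in the original string.
import Mathlib
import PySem

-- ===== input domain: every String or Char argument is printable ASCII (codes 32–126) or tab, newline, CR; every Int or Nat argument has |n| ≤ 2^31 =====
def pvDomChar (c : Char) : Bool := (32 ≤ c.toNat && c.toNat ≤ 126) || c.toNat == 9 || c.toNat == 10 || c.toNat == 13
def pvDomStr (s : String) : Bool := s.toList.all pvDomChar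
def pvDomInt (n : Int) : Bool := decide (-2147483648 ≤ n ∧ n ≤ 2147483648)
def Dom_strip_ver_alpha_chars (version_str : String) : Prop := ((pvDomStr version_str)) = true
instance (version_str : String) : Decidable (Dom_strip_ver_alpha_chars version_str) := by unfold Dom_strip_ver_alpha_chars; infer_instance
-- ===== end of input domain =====

-- B replaces A's character-by-character REPLACING-flag scan by a run-based rewrite: each maximal
-- alphabetic run is turned into one dotted zero decided from its neighbouring original characters
-- (objective: alternative decomposition, same cost).

-- ===== PORT A =====
-- one step of A's for-loop; state = (REPLACING, new_str as List Char); new_str[-1] on a nonempty string is getLast?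
def stripA_step (st : Bool × List Char) (c : Char) : Bool × List Char :=
  if PySem.Chars.isalpha c then
    (true, if st.1 = false ∧ st.2 ≠ [] ∧ st.2.getLast? ≠ some '.' then st.2 ++ ['.'] else st.2)
  else if st.1 = true then
    (false, st.2 ++ ['0'] ++ (if c ≠ '.' then ['.'] else []) ++ [c])
  else
    (false, st.2 ++ [c])

def strip_ver_alpha_chars (version_str : String) : String :=
  let r := version_str.toList.foldl stripA_step (false, [])
  -- new_str.endswith(".") on a List Char is: the last character is '.'
  String.ofList (if r.2.getLast? = some '.' then r.2 ++ ['0'] else r.2)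

-- ===== PORT B =====
-- B's outer while-loop; prev = the character just before the current position (none at position 0)
def stripB_go (prev : Option Char) : List Char → List Char
  | [] => []
  | c :: t =>
    if PySem.Chars.isalpha c then
      -- inner while-loop: skip the maximal alphabetic run; rest resumes at index j
      let rest := t.dropWhile PySem.Chars.isalpha
      let left : List Char := if prev ≠ none ∧ prev ≠ some '.' then ['.'] else []
      let digit : List Char := if prev ≠ none ∨ rest ≠ [] then ['0'] else []
      let right : List Char := match rest with
        | d :: _ => if d ≠ '.' then ['.'] else []
        | [] => []
      left ++ digit ++ right ++ stripB_go prev rest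
    else
      c :: stripB_go (some c) t
termination_by t => t.length
decreasing_by
  · have := List.length_dropWhile_le (p := PySem.Chars.isalpha) (l := t); simp; omega
  · simp

def strip_ver_alpha_chars_alt (version_str : String) : String :=
  let r := stripB_go none version_str.toList
  String.ofList (if r.getLast? = some '.' then r ++ ['0'] else r)

-- ===== PRECONDITION & SPEC =====
def Spec_strip_ver_alpha_chars (version_str : String) (out : String) : Prop := out = strip_ver_alpha_chars_alt version_str
instance (version_str : String) (out : String) : Decidable (Spec_strip_ver_alpha_chars version_str out) := by unfold Spec_strip_ver_alpha_chars; infer_instance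

-- ===== CLAIM (what is proved, stated in full; the proofs are below) =====
def Claim_equal_strip_ver_alpha_chars : Prop := ∀ (version_str : String), Dom_strip_ver_alpha_chars version_str → Spec_strip_ver_alpha_chars version_str (strip_ver_alpha_chars version_str)

-- ===== LEMMAS AND PROOFS =====

-- proof-side characterisation of what A's fold emits, in the same run shape as stripB_go
def bodyA (prev : Option Char) : List Char → List Char
  | [] => []
  | c :: t =>
    if PySem.Chars.isalpha c then
      let rest := t.dropWhile PySem.Chars.isalpha
      let left : List Char := if prev ≠ none ∧ prev ≠ some '.' then ['.'] else []
      match hre : rest with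
      | [] => left
      | d :: r => left ++ '0' :: ((if d ≠ '.' then ['.'] else []) ++ d :: bodyA (some d) r)
    else c :: bodyA (some c) t
termination_by t => t.length
decreasing_by
  · have h2 := List.length_dropWhile_le (p := PySem.Chars.isalpha) (l := t)
    have h3 : (List.dropWhile PySem.Chars.isalpha t).length = r.length + 1 := by
      rw [show List.dropWhile PySem.Chars.isalpha t = d :: r from hre]; rfl
    simp; omega
  · simp

-- the trailing '.0' fix-up, parameterised by the char preceding the produced tail
def fixUp (prev : Option Char) (l : List Char) : List Char :=
  if (l.getLast?.or prev) = some '.' then l ++ ['0'] else l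

lemma fixUp_append_cons (prev : Option Char) (pre : List Char) (c : Char) (l : List Char) :
    fixUp prev (pre ++ c :: l) = pre ++ c :: fixUp (some c) l := by
  unfold fixUp
  rw [List.getLast?_append_cons]
  cases l with
  | nil => by_cases hc : c = '.' <;> simp [hc]
  | cons a l' =>
    have h1 : (c :: a :: l') = [c] ++ a :: l' := rfl
    rw [h1, List.getLast?_append_cons]
    cases h : (a :: l').getLast? with
    | none => simp at h
    | some x => by_cases hx : x = '.' <;> simp [hx]

lemma fixUp_cons (prev : Option Char) (c : Char) (l : List Char) :
    fixUp prev (c :: l) = c :: fixUp (some c) l := by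
  simpa using fixUp_append_cons prev [] c l

-- equation lemmas for bodyA (well-founded definition, unfolded by case on the run's continuation)
lemma bodyA_alpha_nil (prev : Option Char) (c : Char) (t : List Char)
    (hc : PySem.Chars.isalpha c = true) (h : t.dropWhile PySem.Chars.isalpha = []) :
    bodyA prev (c :: t) = (if prev ≠ none ∧ prev ≠ some '.' then ['.'] else []) := by
  simp only [bodyA, hc, if_true]
  split
  · rfl
  · next d r heq => rw [h] at heq; cases heq

lemma bodyA_alpha_cons (prev : Option Char) (c : Char) (t : List Char) (d : Char) (r : List Char)
    (hc : PySem.Chars.isalpha c = true) (h : t.dropWhile PySem.Chars.isalpha = d :: r) :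
    bodyA prev (c :: t) = (if prev ≠ none ∧ prev ≠ some '.' then ['.'] else []) ++
      '0' :: ((if d ≠ '.' then ['.'] else []) ++ d :: bodyA (some d) r) := by
  simp only [bodyA, hc, if_true]
  split
  · next heq => rw [h] at heq; cases heq
  · next d' r' heq =>
    rw [h] at heq
    cases heq
    rfl

lemma bodyA_not_alpha (prev : Option Char) (c : Char) (t : List Char)
    (hc : PySem.Chars.isalpha c = false) :
    bodyA prev (c :: t) = c :: bodyA (some c) t := by
  simp [bodyA, hc]

-- a maximal-run head that fails the predicate
lemma dropWhile_head_false (t : List Char) (d : Char) (r : List Char)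
    (h : t.dropWhile PySem.Chars.isalpha = d :: r) : PySem.Chars.isalpha d = false := by
  have := List.head?_dropWhile_not PySem.Chars.isalpha t
  rw [h] at this; simpa using this

-- with REPLACING set, A's loop leaves the state unchanged over the alphabetic run
lemma A_run (t : List Char) (acc : List Char) :
    List.foldl stripA_step (true, acc) t = List.foldl stripA_step (true, acc) (t.dropWhile PySem.Chars.isalpha) := by
  induction t with
  | nil => rfl
  | cons c t ih =>
    by_cases hc : PySem.Chars.isalpha c = true
    · simp only [List.foldl_cons, List.dropWhile_cons, hc, if_true, stripA_step]
      simpa using ih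
    · simp [List.dropWhile_cons, hc]

-- the first step of a run: A appends the left dot and raises the flag
lemma A_alpha_step (prev : Option Char) (acc : List Char) (c : Char)
    (h : acc.getLast? = prev) (hc : PySem.Chars.isalpha c = true) :
    stripA_step (false, acc) c =
      (true, acc ++ if prev ≠ none ∧ prev ≠ some '.' then ['.'] else []) := by
  subst h
  simp only [stripA_step, hc, if_true]
  by_cases hp : acc.getLast? ≠ none ∧ acc.getLast? ≠ some '.'
  · have hne : acc ≠ [] := by
      intro h0; subst h0; exact hp.1 rfl
    simp [hp, hne]
  · rw [if_neg hp, if_neg, List.append_nil]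
    intro hcon
    exact hp ⟨by rw [ne_eq, List.getLast?_eq_none_iff]; exact hcon.2.1, hcon.2.2⟩

-- A's fold, started with the flag off and an accumulator ending in prev, appends exactly bodyA prev t
lemma A_main (prev : Option Char) (t : List Char) :
    ∀ acc : List Char, acc.getLast? = prev →
      (List.foldl stripA_step (false, acc) t).2 = acc ++ bodyA prev t := by
  induction prev, t using bodyA.induct with
  | case1 prev => intro acc h; simp [bodyA]
  | case2 prev c t hc rest heq =>
    intro acc h
    have heq' : List.dropWhile PySem.Chars.isalpha t = [] := heq
    rw [List.foldl_cons, A_alpha_step prev acc c h hc, A_run, heq']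
    rw [bodyA_alpha_nil prev c t hc heq']
    rfl
  | case3 prev c t hc rest d r heq ih =>
    intro acc h
    have heq' : List.dropWhile PySem.Chars.isalpha t = d :: r := heq
    have hd := dropWhile_head_false t d r heq'
    rw [List.foldl_cons, A_alpha_step prev acc c h hc, A_run, heq', List.foldl_cons]
    have hstep : stripA_step (true, acc ++ if prev ≠ none ∧ prev ≠ some '.' then ['.'] else []) d =
        (false, (acc ++ (if prev ≠ none ∧ prev ≠ some '.' then ['.'] else [])) ++ ['0'] ++
          (if d ≠ '.' then ['.'] else []) ++ [d]) := by
      simp [stripA_step, hd]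
    rw [hstep, ih _ (by cases hdot : decide (d = '.') <;> simp_all)]
    rw [bodyA_alpha_cons prev c t d r hc heq']
    simp
  | case4 prev c t hc ih =>
    intro acc h
    rw [List.foldl_cons]
    have hstep : stripA_step (false, acc) c = (false, acc ++ [c]) := by
      simp [stripA_step, hc]
    rw [hstep, ih _ (by simp)]
    rw [bodyA_not_alpha prev c t (by simpa using hc)]
    simp

-- bodyA and stripB_go agree once the trailing fix-up is applied
lemma body_eq (prev : Option Char) (t : List Char) :
    fixUp prev (bodyA prev t) = fixUp prev (stripB_go prev t) := by
  induction prev, t using stripB_go.induct with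
  | case1 prev => simp [bodyA, stripB_go]
  | case2 prev c t hc rest ih =>
    cases hrest : t.dropWhile PySem.Chars.isalpha with
    | nil =>
      have hA := bodyA_alpha_nil prev c t hc hrest
      have hB : stripB_go prev (c :: t) =
          (if prev ≠ none ∧ prev ≠ some '.' then ['.'] else []) ++
          (if prev ≠ none then ['0'] else []) := by
        simp [stripB_go, hc, hrest]
      rw [hA, hB]
      cases prev with
      | none => simp [fixUp]
      | some p => by_cases hp : p = '.' <;> simp [fixUp, hp]
    | cons d r =>
      have hd := dropWhile_head_false t d r hrest
      have hgo : stripB_go prev (d :: r) = d :: stripB_go (some d) r := by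
        simp [stripB_go, hd]
      have hA : bodyA prev (c :: t) =
          ((if prev ≠ none ∧ prev ≠ some '.' then ['.'] else []) ++
            '0' :: (if d ≠ '.' then ['.'] else [])) ++ d :: bodyA (some d) r := by
        rw [bodyA_alpha_cons prev c t d r hc hrest]; simp
      have hB : stripB_go prev (c :: t) =
          ((if prev ≠ none ∧ prev ≠ some '.' then ['.'] else []) ++
            '0' :: (if d ≠ '.' then ['.'] else [])) ++ d :: stripB_go (some d) r := by
        rw [show stripB_go prev (c :: t) =
            (if prev ≠ none ∧ prev ≠ some '.' then ['.'] else []) ++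
            (if prev ≠ none ∨ (d :: r : List Char) ≠ [] then ['0'] else []) ++
            (if d ≠ '.' then ['.'] else []) ++ stripB_go prev (d :: r) from by
          simp [stripB_go, hc, hrest], hgo]
        simp
      rw [hA, hB, fixUp_append_cons, fixUp_append_cons]
      have ih' : fixUp prev (bodyA prev (d :: r)) = fixUp prev (stripB_go prev (d :: r)) := by
        rw [← hrest]; exact ih
      rw [hgo, bodyA_not_alpha prev d r hd, fixUp_cons, fixUp_cons] at ih'
      simp only [List.cons.injEq, true_and] at ih'
      rw [ih']
  | case3 prev c t hc ih =>
    have hA := bodyA_not_alpha prev c t (by simpa using hc)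
    have hB : stripB_go prev (c :: t) = c :: stripB_go (some c) t := by simp [stripB_go, hc]

    rw [hA, hB, fixUp_cons, fixUp_cons, ih]

-- ===== VERDICT (by name: the statement is the Claim_ definition above) =====
theorem strip_ver_alpha_chars_spec : Claim_equal_strip_ver_alpha_chars := by
  intro s _
  unfold Spec_strip_ver_alpha_chars strip_ver_alpha_chars strip_ver_alpha_chars_alt
  have hA : (List.foldl stripA_step (false, ([] : List Char)) s.toList).2 = bodyA none s.toList := by
    simpa using A_main none s.toList [] rfl
  have hfix : ∀ l : List Char,
      (if l.getLast? = some '.' then l ++ ['0'] else l) = fixUp none l := by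
    intro l; simp [fixUp]
  simp only [hA, hfix]
  rw [body_eq]
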